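-- pv_equiv track=rewrite | github.com/Oshalb/CodeChef | compiler.py | check_prefix
-- ===== SOURCE A (Python) =====
-- def check_prefix(s):
--     t, ans = 0, 0
--     for i, j in enumerate(s):
--         if j == '<':
--             t += 1
--         else:
--             t -= 1
--         if t == 0:
--             ans = max(ans, i+1)
--         elif t < 0:
--             break
--     return ans
-- ===== SOURCE B (Python) =====
-- def check_prefix(s):
--     # Pair every '<' with its closing character via a stack, then jump
--     # block-to-block from position 0; the first unjumpable position is the answer.
--     stack = []
--     match = {}
--     for i, c in enumerate(s):
--         if c == '<':
--             stack.append(i)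
--         elif stack:
--             match[stack.pop()] = i
--     pos = 0
--     while pos < len(s) and s[pos] == '<' and pos in match:
--         pos = match[pos] + 1
--     return pos
-- ===== Notes on version B (the rewrite author's own statement) =====
-- stated objective: alternative
-- what changed: replaced the fused running-balance loop (counter, max, break) by stack-based bracket matching that pairs every opening bracket with its closing character in a dict, followed by pointer-jumping over whole matched blocks from position 0
import Mathlib
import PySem

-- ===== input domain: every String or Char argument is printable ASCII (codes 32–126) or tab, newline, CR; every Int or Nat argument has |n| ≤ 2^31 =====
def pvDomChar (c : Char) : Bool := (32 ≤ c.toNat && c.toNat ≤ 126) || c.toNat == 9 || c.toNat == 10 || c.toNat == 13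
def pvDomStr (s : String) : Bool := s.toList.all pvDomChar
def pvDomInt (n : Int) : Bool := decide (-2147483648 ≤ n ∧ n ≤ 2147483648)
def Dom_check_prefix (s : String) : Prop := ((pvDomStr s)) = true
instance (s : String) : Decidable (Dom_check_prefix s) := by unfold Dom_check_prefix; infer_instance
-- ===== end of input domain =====

-- B replaces A's fused running-balance loop (counter, max, break) by stack-based
-- bracket matching into a dict plus pointer-jumping over matched blocks ("alternative").


-- ===== PORT A =====
-- A's loop: t / ans accumulators, i the enumerate index, break on t < 0.
def checkLoopA (cs : List Char) (i : Nat) (t ans : Int) : Int :=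
  match cs with
  | [] => ans
  | c :: rest =>
    let t' := if c = '<' then t + 1 else t - 1
    if t' = 0 then checkLoopA rest (i + 1) t' (max ans ((i : Int) + 1))
    else if t' < 0 then ans
    else checkLoopA rest (i + 1) t' ans

def check_prefix (s : String) : Int := checkLoopA s.toList 0 0 0

-- ===== PORT B =====
-- B's first pass: `for i, c in enumerate(s): if c=='<': stack.append(i) elif stack: match[stack.pop()]=i`
-- (stack top at the head); returns the final (stack, match) pair.
def buildF : List Char → Int → List Int → PySem.Dict Int Int → List Int × PySem.Dict Int Int
  | [], _, st, d => (st, d)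
  | c :: rest, i, st, d =>
    if c = '<' then buildF rest (i + 1) (i :: st) d
    else
      match st with
      | [] => buildF rest (i + 1) [] d
      | j :: st' => buildF rest (i + 1) st' (d.insert j i)

-- B's second pass: `while pos < len(s) and s[pos]=='<' and pos in match: pos = match[pos]+1`
-- (fuel only makes the while-loop total; it is never exhausted on the admitted inputs).
def jumpF : Nat → List Char → PySem.Dict Int Int → Int → Int
  | 0, _, _, pos => pos
  | f + 1, cs, d, pos =>
    if pos < (cs.length : Int) then
      if PySem.List.pyGet? cs pos = some '<' then
        match d.get? pos with
        | some j => jumpF f cs d (j + 1)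
        | none => pos
      else pos
    else pos

def check_prefix_alt (s : String) : Int :=
  let cs := s.toList
  jumpF (cs.length + 1) cs (buildF cs 0 [] PySem.Dict.empty).2 0

-- ===== PRECONDITION & SPEC =====
def Spec_check_prefix (s : String) (out : Int) : Prop := out = check_prefix_alt s
instance (s : String) (out : Int) : Decidable (Spec_check_prefix s out) := by unfold Spec_check_prefix; infer_instance

-- ===== CLAIM (what is proved, stated in full; the proofs are below) =====
def Claim_equal_check_prefix : Prop := ∀ (s : String), Dom_check_prefix s → Spec_check_prefix s (check_prefix s)

-- ===== LEMMAS AND PROOFS =====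

-- Spec-level helper: scanning cs at nesting depth t (≥ 1), the number of characters
-- consumed up to and including the character that brings the depth to 0 (none if never).
def closeLen (t : Nat) : List Char → Option Nat
  | [] => none
  | c :: rest =>
    if c = '<' then (closeLen (t + 1) rest).map (· + 1)
    else if t = 1 then some 1
    else (closeLen (t - 1) rest).map (· + 1)

-- Common spec: total length of the maximal run of complete balanced blocks at the front.
def consumed : List Char → Nat
  | [] => 0
  | c :: rest =>
    if c = '<' then
      match closeLen 1 rest with
      | some m => 1 + m + consumed (rest.drop m)
      | none => 0
    else 0
termination_by cs => cs.length
decreasing_by simp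


theorem consumed_nil : consumed [] = 0 := by simp [consumed]

theorem consumed_cons_not (c : Char) (rest : List Char) (hc : c ≠ '<') : consumed (c :: rest) = 0 := by
  simp [consumed, hc]

theorem consumed_cons_none (rest : List Char) (he : closeLen 1 rest = none) :
    consumed ('<' :: rest) = 0 := by
  simp [consumed, he]

theorem consumed_cons_some (rest : List Char) (m : Nat) (he : closeLen 1 rest = some m) :
    consumed ('<' :: rest) = 1 + m + consumed (rest.drop m) := by
  simp [consumed, he]

theorem closeLen_pos : ∀ (cs : List Char) (t m : Nat), closeLen t cs = some m → 1 ≤ m ∧ m ≤ cs.length := by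
  intro cs
  induction cs with
  | nil => intro t m h; simp [closeLen] at h
  | cons c rest ih =>
    intro t m h
    simp only [closeLen] at h
    split_ifs at h with h1 h2
    · cases he : closeLen (t + 1) rest with
      | none => rw [he] at h; simp at h
      | some k => rw [he] at h; simp at h; have := ih _ _ he; simp only [List.length_cons]; omega
    · simp at h; simp only [List.length_cons]; omega
    · cases he : closeLen (t - 1) rest with
      | none => rw [he] at h; simp at h
      | some k => rw [he] at h; simp at h; have := ih _ _ he; simp only [List.length_cons]; omega

-- A's loop from depth t ≥ 1 runs to the close of the current block (or to the end / break).
theorem blockA : ∀ (cs : List Char) (t i : Nat) (ans : Int), 1 ≤ t →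
    checkLoopA cs i (t : Int) ans =
      match closeLen t cs with
      | none => ans
      | some m => checkLoopA (cs.drop m) (i + m) 0 (max ans ((i : Int) + (m : Int))) := by
  intro cs
  induction cs with
  | nil => intro t i ans ht; simp [checkLoopA, closeLen]
  | cons c rest ih =>
    intro t i ans ht
    by_cases hc : c = '<'
    · have hcast : (t : Int) + 1 = ((t + 1 : Nat) : Int) := by push_cast; ring
      simp only [checkLoopA, hc, if_pos rfl, closeLen, if_true]
      rw [if_neg (by omega : ¬ (t : Int) + 1 = 0), if_neg (by omega : ¬ (t : Int) + 1 < 0), hcast,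
        ih (t + 1) (i + 1) ans (by omega)]
      cases he : closeLen (t + 1) rest with
      | none => simp [he, hc]
      | some m =>
        simp only [he, Option.map_some, if_pos hc]
        rw [List.drop_succ_cons]
        have h1 : i + 1 + m = i + (m + 1) := by omega
        have h2 : max ans ((↑(i + 1) : Int) + ↑m) = max ans ((↑i : Int) + ↑(m + 1)) := by
          push_cast; ring_nf
        rw [h1, h2]
    · by_cases h1 : t = 1
      · subst h1
        simp only [checkLoopA, hc, if_neg hc, closeLen, if_pos rfl, if_false, if_true]
        norm_num
      · have hcast : (t : Int) - 1 = ((t - 1 : Nat) : Int) := by omega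
        simp only [checkLoopA, hc, if_neg hc, closeLen, if_neg h1, if_false]
        rw [if_neg (by omega : ¬ (t : Int) - 1 = 0), if_neg (by omega : ¬ (t : Int) - 1 < 0), hcast,
          ih (t - 1) (i + 1) ans (by omega)]
        cases he : closeLen (t - 1) rest with
        | none => simp [he, hc]
        | some m =>
          simp only [he, Option.map_some, if_neg hc]
          rw [List.drop_succ_cons]
          have h2 : i + 1 + m = i + (m + 1) := by omega
          have h3 : max ans ((↑(i + 1) : Int) + ↑m) = max ans ((↑i : Int) + ↑(m + 1)) := by
            push_cast; ring_nf
          rw [h2, h3]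

-- A's loop from depth 0 with ans = i computes i + consumed cs.
theorem loopA_eq_consumed : ∀ (n : Nat) (cs : List Char), cs.length ≤ n → ∀ (i : Nat),
    checkLoopA cs i 0 ((i : Nat) : Int) = ((i + consumed cs : Nat) : Int) := by
  intro n
  induction n with
  | zero =>
    intro cs hlen i
    have : cs = [] := List.eq_nil_of_length_eq_zero (by omega)
    subst this; simp [checkLoopA, consumed_nil]
  | succ n ih =>
    intro cs hlen i
    cases cs with
    | nil => simp [checkLoopA, consumed_nil]
    | cons c rest =>
      by_cases hc : c = '<'
      · have estep : checkLoopA (c :: rest) i 0 (↑i) = checkLoopA rest (i + 1) ((1 : Nat) : Int) (↑i) := by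
          simp [checkLoopA, hc]
        rw [estep, blockA rest 1 (i + 1) (↑i) (by omega)]
        subst hc
        cases he : closeLen 1 rest with
        | none => simp [consumed_cons_none rest he]
        | some m =>
          dsimp only
          have hm := closeLen_pos rest 1 m he
          have hmax : max (↑i : Int) ((↑(i + 1) : Int) + ↑m) = ((i + 1 + m : Nat) : Int) := by
            push_cast; omega
          rw [hmax, ih (rest.drop m) (by simp at hlen ⊢; omega) (i + 1 + m)]
          rw [consumed_cons_some rest m he]
          congr 1
          omega
      · have estep : checkLoopA (c :: rest) i 0 (↑i) = ↑i := by
          simp [checkLoopA, hc]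
        rw [estep, consumed_cons_not c rest hc]
        simp

-- buildF over an appended list = run the first part, continue from its state.
theorem buildF_append : ∀ (xs ys : List Char) (i : Int) (st : List Int) (d : PySem.Dict Int Int),
    buildF (xs ++ ys) i st d = buildF ys (i + xs.length) (buildF xs i st d).1 (buildF xs i st d).2 := by
  intro xs
  induction xs with
  | nil => intro ys i st d; simp [buildF]
  | cons c rest ih =>
    intro ys i st d
    by_cases hc : c = '<'
    · simp only [List.cons_append, buildF, hc, if_pos rfl, ih]
      congr 1 <;> push_cast [List.length_cons] <;> ring_nf
    · cases st with
      | nil =>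
        simp only [List.cons_append, buildF, hc, if_neg hc, ih]
        congr 1 <;> push_cast [List.length_cons] <;> ring_nf
      | cons j st' =>
        simp only [List.cons_append, buildF, hc, if_neg hc, ih]
        congr 1 <;> push_cast [List.length_cons] <;> ring_nf

-- every element of the final stack comes from the initial stack or is an index pushed in [i, i+len).
theorem buildF_stack_mem : ∀ (xs : List Char) (i : Int) (st : List Int) (d : PySem.Dict Int Int) (x : Int),
    x ∈ (buildF xs i st d).1 → x ∈ st ∨ (i ≤ x ∧ x < i + xs.length) := by
  intro xs
  induction xs with
  | nil => intro i st d x hx; simp [buildF] at hx; exact Or.inl hx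
  | cons c rest ih =>
    intro i st d x hx
    by_cases hc : c = '<'
    · simp only [buildF, hc, if_pos rfl, if_true] at hx
      rcases ih _ _ _ _ hx with h | h
      · rcases List.mem_cons.mp h with h | h
        · right; subst h; simp only [List.length_cons]; push_cast; omega
        · exact Or.inl h
      · right; simp only [List.length_cons]; push_cast; omega
    · cases st with
      | nil =>
        simp only [buildF, hc, if_neg hc, if_false] at hx
        rcases ih _ _ _ _ hx with h | h
        · simp at h
        · right; simp only [List.length_cons]; push_cast; omega
      | cons j st' =>
        simp only [buildF, hc, if_neg hc, if_false] at hx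
        rcases ih _ _ _ _ hx with h | h
        · exact Or.inl (List.mem_cons_of_mem _ h)
        · right; simp only [List.length_cons]; push_cast; omega

-- a key below i and not on the stack is never touched.
theorem buildF_get_low : ∀ (xs : List Char) (i : Int) (st : List Int) (d : PySem.Dict Int Int) (j : Int),
    (∀ x ∈ st, x ≠ j) → j < i → ((buildF xs i st d).2).get? j = d.get? j := by
  intro xs
  induction xs with
  | nil => intro i st d j _ _; simp [buildF]
  | cons c rest ih =>
    intro i st d j hst hj
    by_cases hc : c = '<'
    · simp only [buildF, hc, if_pos rfl, if_true]
      refine ih _ _ _ _ ?_ (by omega)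
      intro x hx
      rcases List.mem_cons.mp hx with h | h
      · subst h; omega
      · exact hst x h
    · cases st with
      | nil => simp only [buildF, hc, if_neg hc, if_false]; exact ih _ _ _ _ (by simp) (by omega)
      | cons k st' =>
        simp only [buildF, hc, if_neg hc, if_false]
        rw [ih _ _ _ _ (fun x hx => hst x (List.mem_cons_of_mem _ hx)) (by omega)]
        exact PySem.Dict.get?_insert_of_ne _ _ (Ne.symm (hst k (List.mem_cons_self ..)))

-- a key at or beyond i + len is never touched.
theorem buildF_get_high : ∀ (xs : List Char) (i : Int) (st : List Int) (d : PySem.Dict Int Int) (q : Int),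
    (∀ x ∈ st, x < i) → i + xs.length ≤ q → ((buildF xs i st d).2).get? q = d.get? q := by
  intro xs
  induction xs with
  | nil => intro i st d q _ _; simp [buildF]
  | cons c rest ih =>
    intro i st d q hst hq
    simp only [List.length_cons] at hq
    push_cast at hq
    by_cases hc : c = '<'
    · simp only [buildF, hc, if_pos rfl, if_true]
      refine ih _ _ _ _ ?_ (by push_cast; omega)
      intro x hx
      rcases List.mem_cons.mp hx with h | h
      · omega
      · have := hst x h; omega
    · cases st with
      | nil => simp only [buildF, hc, if_neg hc, if_false]; exact ih _ _ _ _ (by simp) (by push_cast; omega)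
      | cons k st' =>
        simp only [buildF, hc, if_neg hc, if_false]
        rw [ih _ _ _ _ (fun x hx => by have := hst x (List.mem_cons_of_mem _ hx); omega)
          (by push_cast; omega)]
        refine PySem.Dict.get?_insert_of_ne _ _ ?_
        have := hst k (List.mem_cons_self ..)
        omega

-- the open j on the stack below the depth-|stA| opens gets matched exactly at the
-- first point where the local depth stA.length + 1 reaches 0.
theorem buildF_get_stack : ∀ (cs : List Char) (i : Int) (stA : List Int) (j : Int) (stB : List Int)
    (d : PySem.Dict Int Int),
    (∀ x ∈ stA ++ j :: stB, x < i) → j ∉ stA → j ∉ stB → d.get? j = none →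
    ((buildF cs i (stA ++ j :: stB) d).2).get? j
      = (closeLen (stA.length + 1) cs).map (fun m => i + (m : Int) - 1) := by
  intro cs
  induction cs with
  | nil => intro i stA j stB d _ _ _ hd; simp [buildF, closeLen, hd]
  | cons c rest ih =>
    intro i stA j stB d hlt hA hB hd
    by_cases hc : c = '<'
    · have step : buildF (c :: rest) i (stA ++ j :: stB) d
          = buildF rest (i + 1) ((i :: stA) ++ j :: stB) d := by
        simp [buildF, hc]
      rw [step, ih (i + 1) (i :: stA) j stB d
        (by intro x hx; rcases List.mem_cons.mp hx with h | h
            · subst h; omega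
            · have := hlt x h; omega)
        (by intro h; rcases List.mem_cons.mp h with h | h
            · have := hlt j (by simp); omega
            · exact hA h)
        hB hd]
      simp only [closeLen, if_pos hc, List.length_cons]
      cases he : closeLen (stA.length + 1 + 1) rest with
      | none => simp [he]
      | some m => simp [he]; push_cast; ring
    · cases stA with
      | nil =>
        have step : buildF (c :: rest) i ([] ++ j :: stB) d
            = buildF rest (i + 1) stB (d.insert j i) := by
          simp [buildF, hc]
        rw [step, buildF_get_low rest (i + 1) stB (d.insert j i) j
          (fun x hx => by intro h; exact hB (h ▸ hx)) (by have := hlt j (by simp); omega)]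
        rw [PySem.Dict.get?_insert_self]
        simp [closeLen, hc]
      | cons k stA' =>
        have step : buildF (c :: rest) i ((k :: stA') ++ j :: stB) d
            = buildF rest (i + 1) (stA' ++ j :: stB) (d.insert k i) := by
          simp [buildF, hc]
        have hkj : j ≠ k := fun h => hA (by simp [h])
        rw [step, ih (i + 1) stA' j stB (d.insert k i)
          (by intro x hx; have := hlt x (List.mem_cons_of_mem _ hx); omega)
          (fun h => hA (List.mem_cons_of_mem _ h)) hB
          (by rw [PySem.Dict.get?_insert_of_ne _ _ hkj]; exact hd)]
        simp only [closeLen, if_neg hc, List.length_cons,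
          if_neg (by omega : ¬ stA'.length + 1 + 1 = 1)]
        have harith : stA'.length + 1 + 1 - 1 = stA'.length + 1 := by omega
        rw [harith]
        cases he : closeLen (stA'.length + 1) rest with
        | none => simp [he]
        | some m => simp [he]; push_cast; ring

-- final characterization: for any open position q, the match dict holds its closer's index.
theorem buildF_get_final (cs : List Char) (q : Nat) (hq : q < cs.length) (hc : cs[q] = '<') :
    ((buildF cs 0 [] PySem.Dict.empty).2).get? (q : Int)
      = (closeLen 1 (cs.drop (q + 1))).map (fun (m : Nat) => (q : Int) + (m : Int)) := by
  have hsplit : cs.take q ++ cs.drop q = cs := List.take_append_drop q cs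
  have hdrop : cs.drop q = cs[q] :: cs.drop (q + 1) := (List.getElem_cons_drop hq).symm
  have hlen : (cs.take q).length = q := by simp; omega
  conv_lhs => rw [← hsplit]
  rw [buildF_append, hlen, hdrop, hc]
  set st := (buildF (cs.take q) 0 [] PySem.Dict.empty).1 with hst
  set d := (buildF (cs.take q) 0 [] PySem.Dict.empty).2 with hd
  have hstlt : ∀ x ∈ st, x < (q : Int) := by
    intro x hx
    rcases buildF_stack_mem (cs.take q) 0 [] PySem.Dict.empty x hx with h | h
    · simp at h
    · rw [hlen] at h; omega
  have step : buildF ('<' :: cs.drop (q + 1)) (0 + (q : Int)) st d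
      = buildF (cs.drop (q + 1)) ((q : Int) + 1) ([] ++ (q : Int) :: st) d := by
    simp [buildF]
  rw [step, buildF_get_stack (cs.drop (q + 1)) ((q : Int) + 1) [] (q : Int) st d
    (by intro x hx; simp at hx
        rcases hx with h | h
        · omega
        · have := hstlt x h; omega)
    (by simp)
    (fun h => by have := hstlt _ h; omega)
    (by rw [hd, buildF_get_high (cs.take q) 0 [] PySem.Dict.empty (q : Int) (by simp)
          (by rw [hlen]; omega)]
        simp [PySem.Dict.get?_empty])]
  simp only [List.length_nil, Nat.zero_add]
  cases he : closeLen 1 (cs.drop (q + 1)) with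
  | none => simp [he]
  | some m => simp [he]; ring

-- B's jump loop from position p computes p + consumed (cs.drop p).
theorem jump_eq_consumed (cs : List Char) : ∀ (f : Nat) (p : Nat), cs.length - p < f →
    jumpF f cs (buildF cs 0 [] PySem.Dict.empty).2 (p : Int) = ((p + consumed (cs.drop p) : Nat) : Int) := by
  intro f
  induction f with
  | zero => intro p h; omega
  | succ f ih =>
    intro p hp
    by_cases hlt : p < cs.length
    · have hlti : ((p : Nat) : Int) < (cs.length : Int) := by omega
      by_cases hc : cs[p] = '<'
      · have hget : PySem.List.pyGet? cs ((p : Nat) : Int) = some '<' := by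
          rw [PySem.List.pyGet?_natCast, List.getElem?_eq_getElem hlt, hc]
        simp only [jumpF, if_pos hlti, hget, if_true]
        rw [buildF_get_final cs p hlt hc]
        have hdropp : cs.drop p = '<' :: cs.drop (p + 1) := by
          rw [← (List.getElem_cons_drop hlt), hc]
        cases he : closeLen 1 (cs.drop (p + 1)) with
        | none =>
          simp only [Option.map_none]
          rw [hdropp, consumed_cons_none _ he]
          simp
        | some m =>
          have hm := closeLen_pos _ _ _ he
          simp only [Option.map_some]
          have hcast : ((p : Int) + (m : Int)) + 1 = ((p + m + 1 : Nat) : Int) := by push_cast; ring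
          rw [hcast, ih (p + m + 1) (by simp only [List.length_drop] at hm; omega)]
          rw [hdropp, consumed_cons_some _ _ he, List.drop_drop]
          have harith : p + 1 + m = p + m + 1 := by omega
          rw [harith]
          congr 1
          omega
      · have hget : PySem.List.pyGet? cs ((p : Nat) : Int) = some cs[p] := by
          rw [PySem.List.pyGet?_natCast, List.getElem?_eq_getElem hlt]
        have hne : ¬ PySem.List.pyGet? cs ((p : Nat) : Int) = some '<' := by
          rw [hget]; simp; exact hc
        simp only [jumpF, if_pos hlti, if_neg hne]
        have hdropp : cs.drop p = cs[p] :: cs.drop (p + 1) := (List.getElem_cons_drop hlt).symm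
        rw [hdropp, consumed_cons_not _ _ hc]
        simp
    · have hge : ¬ ((p : Nat) : Int) < (cs.length : Int) := by omega
      simp only [jumpF, if_neg hge]
      rw [List.drop_eq_nil_of_le (by omega)]
      simp [consumed]

-- ===== VERDICT (by name: the statement is the Claim_ definition above) =====
theorem check_prefix_spec : Claim_equal_check_prefix := by
  intro s _
  unfold Spec_check_prefix check_prefix check_prefix_alt
  have hA := loopA_eq_consumed s.toList.length s.toList (le_refl _) 0
  have hB := jump_eq_consumed s.toList (s.toList.length + 1) 0 (by omega)
  simp only [Nat.cast_zero, Nat.zero_add, List.drop_zero] at hA hB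
  rw [hA, hB]
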